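-- pv_equiv track=rewrite | github.com/olegstepanov/mobile | mobile/simulate.py | _group_by_level
-- ===== SOURCE A (Python) =====
-- def _group_by_level(depth_map: dict[str, int]) -> list[list[str]]:
--     """Group branch labels by depth, bottom-up (deepest first)."""
--     if not depth_map:
--         return []
--     max_depth = max(depth_map.values())
--     levels: list[list[str]] = []
--     for d in range(max_depth, -1, -1):
--         level = [label for label, dep in depth_map.items() if dep == d]
--         if level:
--             levels.append(level)
--     return levels
-- ===== SOURCE B (Python) =====
-- def _group_by_level(depth_map: dict[str, int]) -> list[list[str]]:
--     """Group branch labels by depth, bottom-up (deepest first): one-pass bucketing."""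
--     buckets: dict[int, list[str]] = {}
--     for label, dep in depth_map.items():
--         buckets.setdefault(dep, []).append(label)
--     return [buckets[d] for d in sorted(buckets, reverse=True) if d >= 0]
-- ===== Notes on version B (the rewrite author's own statement) =====
-- stated objective: alternative
-- what changed: Instead of rescanning the whole map once for every depth from max_depth down to 0, B buckets the labels by depth in one pass over the map and emits the present nonnegative depths in descending sorted order (asymptotically better when max_depth >> number of entries, though a timing run on the generated inputs read only ~1.3x).
import Mathlib
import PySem

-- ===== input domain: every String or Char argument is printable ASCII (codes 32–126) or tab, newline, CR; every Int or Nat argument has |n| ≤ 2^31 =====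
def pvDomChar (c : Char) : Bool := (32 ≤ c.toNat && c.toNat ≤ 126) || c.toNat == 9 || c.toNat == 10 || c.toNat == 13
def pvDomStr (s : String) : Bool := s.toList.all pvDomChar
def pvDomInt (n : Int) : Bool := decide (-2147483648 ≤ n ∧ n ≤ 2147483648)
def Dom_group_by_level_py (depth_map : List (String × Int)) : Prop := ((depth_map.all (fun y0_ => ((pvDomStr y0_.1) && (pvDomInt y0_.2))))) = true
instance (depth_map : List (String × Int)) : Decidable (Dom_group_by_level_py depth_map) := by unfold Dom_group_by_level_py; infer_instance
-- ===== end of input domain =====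

-- B replaces A's scan of the whole map once per depth level by one-pass bucketing into a
-- dict keyed by depth, emitting the present nonnegative depths in descending sorted order.

-- ===== PORT A =====
def group_by_level_py (depth_map : List (String × Int)) : List (List String) :=
  if depth_map.isEmpty then []
  else
    match PySem.List.max? (depth_map.map (fun p => p.2)) (fun v => v) with
    | none => []   -- unreachable: the values list is nonempty here, so Python's max cannot raise
    | some max_depth =>
      (PySem.List.pyRange max_depth (-1) (-1)).foldl
        (fun levels d =>
          let level := (depth_map.filter (fun p => p.2 == d)).map (fun p => p.1)
          if !level.isEmpty then levels ++ [level] else levels) []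

-- ===== PORT B =====
def group_by_level_py_alt (depth_map : List (String × Int)) : List (List String) :=
  let buckets : PySem.Dict Int (List String) :=
    depth_map.foldl (fun b p => b.modify p.2 [] (fun l => l ++ [p.1])) PySem.Dict.empty
  ((PySem.List.sorted buckets.keys (fun d => d) true).filter (fun d => decide (0 ≤ d))).map
    (fun d => buckets.getD d [])

-- ===== PRECONDITION & SPEC =====
def Spec_group_by_level_py (depth_map : List (String × Int)) (out : List (List String)) : Prop := out = group_by_level_py_alt depth_map
instance (depth_map : List (String × Int)) (out : List (List String)) : Decidable (Spec_group_by_level_py depth_map out) := by unfold Spec_group_by_level_py; infer_instance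

-- ===== CLAIM (what is proved, stated in full; the proofs are below) =====
def Claim_equal_group_by_level_py : Prop := ∀ (depth_map : List (String × Int)), Dom_group_by_level_py depth_map → Spec_group_by_level_py depth_map (group_by_level_py depth_map)

-- ===== LEMMAS AND PROOFS =====
lemma pyRange_desc (m : Int) :
    PySem.List.pyRange m (-1) (-1) =
      (List.range (m + 1).toNat).map (fun k : ℕ => m - (k : Int)) := by
  simp only [PySem.List.pyRange]
  have h0 : (-1 : Int) ≠ 0 := by decide
  have h1 : ¬ (0 : Int) < -1 := by decide
  simp only [if_neg h0, if_neg h1]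
  split_ifs with h
  · have h2 : m - -1 + - -1 - 1 = m + 1 := by ring
    have h3 : (m + 1) / - -(1:Int) = m + 1 := by norm_num
    rw [h2, h3]
    apply List.map_congr_left
    intro k _
    omega
  · have : (m + 1).toNat = 0 := by omega
    simp [this]

lemma mem_pyRange_desc (m d : Int) :
    d ∈ PySem.List.pyRange m (-1) (-1) ↔ 0 ≤ d ∧ d ≤ m := by
  rw [pyRange_desc]
  simp only [List.mem_map, List.mem_range]
  constructor
  · rintro ⟨k, hk, rfl⟩; omega
  · rintro ⟨h0, h1⟩
    exact ⟨(m - d).toNat, by omega, by omega⟩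

lemma pairwise_gt_pyRange_desc (m : Int) :
    List.Pairwise (· > ·) (PySem.List.pyRange m (-1) (-1)) := by
  rw [pyRange_desc]
  refine List.Pairwise.map _ (fun a b hab => ?_) (List.pairwise_lt_range)
  omega

lemma buckets_getD (depth_map : List (String × Int)) (c : Int) :
    (depth_map.foldl (fun b p => b.modify p.2 [] (fun l => l ++ [p.1]))
        (PySem.Dict.empty : PySem.Dict Int (List String))).getD c [] =
      (depth_map.filter (fun p => p.2 == c)).map (fun p => p.1) := by
  have h := PySem.Dict.getD_foldl_modify_append (depth_map.map (fun p => ((p.2 : Int), p.1)))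
      (PySem.Dict.empty : PySem.Dict Int (List String)) c
  rw [List.foldl_map] at h
  simpa [List.filter_map, Function.comp, List.map_map] using h

lemma buckets_keys (depth_map : List (String × Int)) :
    (depth_map.foldl (fun b p => b.modify p.2 [] (fun l => l ++ [p.1]))
        (PySem.Dict.empty : PySem.Dict Int (List String))).keys =
      PySem.Set.ofList (depth_map.map (fun p => p.2)) := by
  have h := PySem.Dict.keys_foldl_modify_key depth_map (fun p => p.2) ([] : List String)
      (fun _ p => fun l => l ++ [p.1]) (PySem.Dict.empty : PySem.Dict Int (List String))
  rw [h]
  rfl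

-- ===== VERDICT (by name: the statement is the Claim_ definition above) =====
theorem group_by_level_py_spec : Claim_equal_group_by_level_py := by
  intro dm _
  unfold Spec_group_by_level_py
  unfold group_by_level_py group_by_level_py_alt
  by_cases hemp : dm.isEmpty
  · have : dm = [] := List.isEmpty_iff.mp hemp
    subst this
    simp [PySem.List.sorted, PySem.Dict.keys, PySem.Dict.empty]
  · rw [if_neg hemp]
    have hne : dm ≠ [] := by simpa [List.isEmpty_iff] using hemp
    rcases hsome : PySem.List.max? (dm.map (fun p => p.2)) (fun v => v) with _ | m
    · exact absurd ((PySem.List.max?_eq_none_iff _ _).mp hsome) (by simpa using hne)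
    rw [hsome]
    set B := dm.foldl (fun b p => b.modify p.2 [] (fun l => l ++ [p.1]))
        (PySem.Dict.empty : PySem.Dict Int (List String)) with hB
    dsimp only
    -- A's loop is a filtered map (PySem.List.foldl_append_if)
    refine (PySem.List.foldl_append_if
      (fun d => !((dm.filter (fun p => p.2 == d)).map (fun p => p.1)).isEmpty)
      (fun d => (dm.filter (fun p => p.2 == d)).map (fun p => p.1))
      (PySem.List.pyRange m (-1) (-1)) []).trans ?_
    simp only [List.nil_append]
    -- B's lookup is A's level list
    have hget : (fun d => B.getD d []) =
        (fun d => (dm.filter (fun p => p.2 == d)).map (fun p => p.1)) := by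
      funext d; rw [hB]; exact buckets_getD dm d
    rw [hget]
    -- it remains to show the two index lists are equal
    congr 1
    have hkeys : B.keys = PySem.Set.ofList (dm.map (fun p => p.2)) := buckets_keys dm
    have hknd : B.keys.Nodup := by rw [hkeys]; exact PySem.Set.nodup_ofList _
    have hkmem : ∀ d, d ∈ B.keys ↔ ∃ p ∈ dm, p.2 = d := by
      intro d; rw [hkeys, PySem.Set.mem_ofList]; simp
    have hlvl_ne : ∀ d : Int,
        (((dm.filter (fun p => p.2 == d)).map (fun p => p.1)).isEmpty = false) ↔
          ∃ p ∈ dm, p.2 = d := by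
      intro d
      simp [List.isEmpty_eq_false_iff, List.filter_eq_nil_iff]
    have hmax : ∀ d, (∃ p ∈ dm, p.2 = d) → d ≤ m := by
      rintro d ⟨p, hp, rfl⟩
      exact PySem.List.max?_isMax hsome p.2 (List.mem_map_of_mem hp)
    have hsnd : (PySem.List.sorted B.keys (fun d => d) true).Nodup :=
      ((PySem.List.sorted_perm B.keys (fun d => d) true).nodup_iff).mpr hknd
    have hspw : List.Pairwise (· > ·) (PySem.List.sorted B.keys (fun d => d) true) := by
      have h1 := PySem.List.sorted_pairwise_rev B.keys (fun d => d)
      have h2 := hsnd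
      rw [List.Nodup] at h2
      exact (List.Pairwise.and h1 h2).imp
        (by rintro a b ⟨hle, hne2⟩; exact lt_of_le_of_ne hle (by simpa using hne2.symm))
    apply List.Perm.eq_of_pairwise (le := (· > ·))
      (fun a b _ _ h1 h2 => absurd h1 (lt_asymm h2))
    · exact (pairwise_gt_pyRange_desc m).sublist List.filter_sublist
    · exact hspw.sublist List.filter_sublist
    · rw [List.perm_ext_iff_of_nodup
        (((pairwise_gt_pyRange_desc m).imp (fun h => ne_of_gt h)).filter _)
        (hsnd.filter _)]
      intro a
      simp only [List.mem_filter, mem_pyRange_desc, decide_eq_true_eq, Bool.not_eq_true']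
      rw [hlvl_ne a, (PySem.List.sorted_perm B.keys (fun d => d) true).mem_iff, hkmem a]
      constructor
      · rintro ⟨⟨h0, _⟩, hmem⟩; exact ⟨hmem, h0⟩
      · rintro ⟨hmem, h0⟩; exact ⟨⟨h0, hmax a hmem⟩, hmem⟩
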